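-- pv_equiv track=rewrite | github.com/tycyd/codeforces | string/1363B Subsequence Hate.py | get_ra
-- ===== SOURCE A (Python) =====
-- def get_ra(s):
--     ra = [[0, 0] for i in range(len(s))]
--
--     cnt0 = 0
--     cnt1 = 0
--     for i in range(len(s)-1, -1, -1):
--         if s[i] == '0':
--             cnt0 += 1
--         else:
--             cnt1 += 1
--         ra[i][0] = cnt0
--         ra[i][1] = cnt1
--     return ra
-- ===== SOURCE B (Python) =====
-- def get_ra(s):
--     total0 = s.count('0')
--     total1 = len(s) - total0
--     seen0 = 0
--     seen1 = 0
--     ra = []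
--     for ch in s:
--         ra.append([total0 - seen0, total1 - seen1])
--         if ch == '0':
--             seen0 += 1
--         else:
--             seen1 += 1
--     return ra
-- ===== Notes on version B (the rewrite author's own statement) =====
-- stated objective: alternative
-- what changed: Replaces the backward suffix-accumulator pass over indices with a forward pass that precomputes total counts once and emits totals minus running prefix counts, so no reverse traversal or index arithmetic is needed.
import Mathlib
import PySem

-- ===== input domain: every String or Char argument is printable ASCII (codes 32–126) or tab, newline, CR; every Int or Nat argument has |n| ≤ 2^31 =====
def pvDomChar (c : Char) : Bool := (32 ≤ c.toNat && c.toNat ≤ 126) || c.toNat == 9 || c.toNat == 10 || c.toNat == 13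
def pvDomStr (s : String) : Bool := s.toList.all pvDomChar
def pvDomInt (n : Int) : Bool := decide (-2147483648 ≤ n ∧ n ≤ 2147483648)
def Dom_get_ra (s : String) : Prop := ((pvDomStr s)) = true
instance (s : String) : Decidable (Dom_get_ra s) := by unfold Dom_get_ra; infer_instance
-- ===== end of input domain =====

-- B replaces A's backward index loop with a forward pass emitting totals minus running prefix counts; alternative decomposition, same cost.

-- ===== PORT A =====
-- A's loop runs i from len(s)-1 down to 0, updating suffix counters cnt0/cnt1 and writing
-- ra[i]; transliterated as a tail recursion over the reversed character list that prepends
-- each written entry (the [0,0] placeholders are all overwritten, so they never appear).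
def getRaLoopA : List Char → Int → Int → List (List Int) → List (List Int)
  | [], _, _, acc => acc
  | c :: rest, cnt0, cnt1, acc =>
    if c = '0' then getRaLoopA rest (cnt0 + 1) cnt1 ([cnt0 + 1, cnt1] :: acc)
    else getRaLoopA rest cnt0 (cnt1 + 1) ([cnt0, cnt1 + 1] :: acc)

def get_ra (s : String) : List (List Int) :=
  getRaLoopA s.toList.reverse 0 0 []

-- ===== PORT B =====
-- forward loop of Source B: append [total0-seen0, total1-seen1], then update the prefix counters
def getRaLoopB : List Char → Int → Int → Int → Int → List (List Int)
  | [], _, _, _, _ => []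
  | c :: rest, t0, t1, s0, s1 =>
    [t0 - s0, t1 - s1] ::
      (if c = '0' then getRaLoopB rest t0 t1 (s0 + 1) s1
       else getRaLoopB rest t0 t1 s0 (s1 + 1))

def get_ra_alt (s : String) : List (List Int) :=
  -- s.count('0') with a single-character pattern is exactly the count of the char '0'
  let total0 : Int := (s.toList.count '0' : Int)
  let total1 : Int := (s.toList.length : Int) - total0
  getRaLoopB s.toList total0 total1 0 0

-- ===== PRECONDITION & SPEC =====
def Spec_get_ra (s : String) (out : List (List Int)) : Prop := out = get_ra_alt s
instance (s : String) (out : List (List Int)) : Decidable (Spec_get_ra s out) := by unfold Spec_get_ra; infer_instance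

-- ===== CLAIM (what is proved, stated in full; the proofs are below) =====
def Claim_equal_get_ra : Prop := ∀ (s : String), Dom_get_ra s → Spec_get_ra s (get_ra s)

-- ===== LEMMAS AND PROOFS =====

-- number of '0' characters, as an Int
def zcnt : List Char → Int
  | [] => 0
  | c :: rest => (if c = '0' then 1 else 0) + zcnt rest

-- common characterisation: entry i is [c0 + zeros(l[i:]), c1 + ones(l[i:])]
def specRa : List Char → Int → Int → List (List Int)
  | [], _, _ => []
  | c :: rest, c0, c1 =>
    [c0 + zcnt (c :: rest), c1 + ((c :: rest).length - zcnt (c :: rest))] :: specRa rest c0 c1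

theorem zcnt_append_singleton (ys : List Char) (x : Char) :
    zcnt (ys ++ [x]) = zcnt ys + (if x = '0' then 1 else 0) := by
  induction ys with
  | nil => simp [zcnt]
  | cons a as iha => simp only [List.cons_append, zcnt, iha]; ring

theorem specRa_append_singleton (xs : List Char) (x : Char) (c0 c1 : Int) :
    specRa (xs ++ [x]) c0 c1 =
      specRa xs (c0 + (if x = '0' then 1 else 0)) (c1 + (if x = '0' then 0 else 1))
        ++ [[c0 + (if x = '0' then 1 else 0), c1 + (if x = '0' then 0 else 1)]] := by
  induction xs generalizing c0 c1 with
  | nil =>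
    simp only [List.nil_append, specRa, zcnt, List.length_cons, List.length_nil]
    split_ifs <;> norm_num
  | cons y ys ih =>
    simp only [List.cons_append, specRa, ih, List.cons.injEq, zcnt_append_singleton,
      List.length_append, List.length_cons, List.length_nil, zcnt]
    and_intros <;> first | trivial | rfl | (push_cast; split_ifs <;> ring)

theorem loopA_eq_specRa (r : List Char) (c0 c1 : Int) (acc : List (List Int)) :
    getRaLoopA r c0 c1 acc = specRa r.reverse c0 c1 ++ acc := by
  induction r generalizing c0 c1 acc with
  | nil => simp [getRaLoopA, specRa]
  | cons c rest ih =>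
    simp only [getRaLoopA, List.reverse_cons, specRa_append_singleton]
    split_ifs with h <;> simp [h, ih, List.append_assoc]

theorem loopB_eq_specRa (l : List Char) (t0 t1 s0 s1 : Int) :
    getRaLoopB l t0 t1 s0 s1 =
      specRa l (t0 - s0 - zcnt l) (t1 - s1 - ((l.length : Int) - zcnt l)) := by
  induction l generalizing s0 s1 with
  | nil => simp [getRaLoopB, specRa]
  | cons c rest ih =>
    simp only [getRaLoopB, specRa, zcnt, List.length_cons, ih, List.cons.injEq]
    split_ifs with h <;>
      and_intros <;> first | trivial | (push_cast; ring) | (congr 1 <;> push_cast <;> ring)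

theorem zcnt_eq_count (l : List Char) : zcnt l = (l.count '0' : Int) := by
  induction l with
  | nil => simp [zcnt]
  | cons c rest ih =>
    simp [zcnt, List.count_cons, ih]
    split_ifs with h <;> omega

-- ===== VERDICT (by name: the statement is the Claim_ definition above) =====
theorem get_ra_spec : Claim_equal_get_ra := by
  intro s _
  unfold Spec_get_ra get_ra get_ra_alt
  rw [loopA_eq_specRa, loopB_eq_specRa, List.reverse_reverse, ← zcnt_eq_count]
  simp
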